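-- pv_equiv track=rewrite | github.com/diegorandolp/2025-1 | Competitiva/template.py | solve
-- ===== SOURCE A (Python) =====
-- def solve(n, lasers):
--     # Sort lasers by position (ascending)
--     lasers.sort(key=lambda x: x[0])
--
--     # Find the rightmost laser position
--     max_pos = lasers[-1][0]
--
--     # The new laser will be placed just to the right of all existing lasers
--     new_laser_pos = max_pos + 1
--
--     # Instead of trying all possible power levels (which would be too many),
--     # we only need to try power levels that make a difference
--     # These are the powers that exactly reach different existing lasers
--     power_levels = set()
--     power_levels.add(0)  # Don't destroy any lasers
--
--     for pos, _ in lasers: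
--         power_levels.add(new_laser_pos - pos)
--
--     # Sort power levels for better iteration
--     power_levels = sorted(list(power_levels))
--
--     min_destroyed = n  # Initialize with worst case
--
--     # Try each power level from the set
--     for power in power_levels:
--         # We only consider valid power levels
--         if power < 0:
--             continue
--
--         # Count how many lasers are destroyed by the new laser
--         destroyed_by_new = 0
--         survived = []  # List of lasers that survive the new laser
--
--         for pos, power_level in lasers:
--             if new_laser_pos - pos <= power:
--                 destroyed_by_new += 1
--             else:
--                 survived.append((pos, power_level))
--
--         # If all lasers are destroyed by the new one, we're done
--         if destroyed_by_new == n: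
--             min_destroyed = min(min_destroyed, n)
--             continue
--
--         # Now we need to simulate the chain reaction among the surviving lasers
--         # Sort surviving lasers by position in descending order (right to left)
--         survived.sort(reverse=True)
--
--         # Track which lasers are still active after the chain reaction
--         active = [True] * len(survived)
--         total_destroyed = destroyed_by_new  # Start with ones destroyed by new laser
--
--         # Activate each surviving laser from right to left
--         for i in range(len(survived)):
--             if active[i]:  # If this laser is still active
--                 pos_i, power_i = survived[i]
--                 # Check which other lasers it destroys
--                 for j in range(i + 1, len(survived)):
--                     if active[j]:
--                         pos_j, _ = survived[j]
--                         if pos_i - pos_j <= power_i:  # Within destruction range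
--                             active[j] = False
--                             total_destroyed += 1
--
--         # Update minimum destroyed count
--         min_destroyed = min(min_destroyed, total_destroyed)
--
--     return min_destroyed
-- ===== SOURCE B (Python) =====
-- def solve(n, lasers):
--     # Same in-place sort side effect as the original (equivalence is about the return value).
--     lasers.sort(key=lambda x: x[0])
--     s = sorted(lasers)
--     m = len(s)
--     # Candidate "cut" points: the new laser's useful powers destroy exactly the lasers
--     # at or right of some existing position (or nothing at all, cut = m).
--     cuts = [m]
--     for i in range(m):
--         if i == 0 or s[i][0] != s[i - 1][0]:
--             cuts.append(i)
--     best = n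
--     for k in cuts:
--         # Chain reaction over the surviving prefix s[:k], swept right-to-left with a
--         # running destruction threshold: a laser survives iff its position is below
--         # the minimum reach of all active lasers to its right.
--         t = None
--         alive = 0
--         for p, w in reversed(s[:k]):
--             if t is None or p < t:
--                 alive += 1
--                 r = p - w
--                 t = r if t is None else min(t, r)
--         best = min(best, m - alive)
--     return best
-- ===== Notes on version B (the rewrite author's own statement) =====
-- stated objective: faster
-- what changed: Instead of re-running an O(n^2) active-array chain-reaction simulation for every candidate power, B sorts once, enumerates the candidate survivor prefixes (cut points at distinct positions) and counts chain survivors of each prefix with a single right-to-left sweep carrying a running minimum destruction threshold, giving O(n^2) total instead of O(n^3).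
import Mathlib
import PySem

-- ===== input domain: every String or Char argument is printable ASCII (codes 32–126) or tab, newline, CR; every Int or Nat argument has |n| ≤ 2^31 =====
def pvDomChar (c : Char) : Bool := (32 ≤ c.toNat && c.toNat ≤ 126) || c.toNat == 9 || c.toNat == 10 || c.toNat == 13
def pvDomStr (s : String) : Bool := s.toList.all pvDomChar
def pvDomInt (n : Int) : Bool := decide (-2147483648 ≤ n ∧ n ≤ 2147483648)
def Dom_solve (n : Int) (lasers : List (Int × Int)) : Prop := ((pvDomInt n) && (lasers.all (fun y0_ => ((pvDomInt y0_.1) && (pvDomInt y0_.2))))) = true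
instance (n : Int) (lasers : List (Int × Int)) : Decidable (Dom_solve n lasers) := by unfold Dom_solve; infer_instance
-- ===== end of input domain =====

-- B replaces the per-power active-array chain simulation by a single right-to-left
-- threshold sweep per candidate survivor prefix (measurably faster); equivalence is about
-- the return value (both Pythons perform the same in-place position sort of `lasers`).

-- ===== PORT A =====
-- Python A's inner chain loop: `for j in range(i+1, len(survived)): …` with the active array.
def killStep (surv : List (Int × Int)) (li : Int × Int) (st2 : List Bool × Int) (j : Int) :
    List Bool × Int :=
  if PySem.List.pyGetD st2.1 j false then
    if li.1 - (PySem.List.pyGetD surv j ((0 : Int), (0 : Int))).1 ≤ li.2 then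
      -- `active[j] = False`: j comes from range(i+1, len), so 0 ≤ j and .set j.toNat is exact
      (st2.1.set j.toNat false, st2.2 + 1)
    else st2
  else st2

-- Python A's outer chain loop body: `if active[i]: …` firing laser i.
def fireStep (surv : List (Int × Int)) (st : List Bool × Int) (i : Int) : List Bool × Int :=
  if PySem.List.pyGetD st.1 i false then
    (PySem.List.pyRange (i + 1) (surv.length : Int) 1).foldl
      (killStep surv (PySem.List.pyGetD surv i ((0 : Int), (0 : Int)))) st
  else st

def solve (n : Int) (lasers : List (Int × Int)) : Int :=
  let ls := PySem.List.sorted lasers (fun x => x.1) false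
  match PySem.List.pyGet? ls (-1) with
  | none => 0   -- lasers == []: Python raises IndexError on lasers[-1]; excluded by Pre_solve
  | some last =>
    let maxPos := last.1
    let newLaserPos := maxPos + 1
    let powerLevels : PySem.Set Int :=
      ls.foldl (fun s l => PySem.Set.add s (newLaserPos - l.1)) (PySem.Set.add PySem.Set.empty 0)
    let powers := PySem.List.sorted powerLevels (fun x => x) false
    powers.foldl (fun minDestroyed power =>
      if power < 0 then minDestroyed
      else
        let ds := ls.foldl (fun (acc : Int × List (Int × Int)) l =>
            if newLaserPos - l.1 ≤ power then (acc.1 + 1, acc.2) else (acc.1, acc.2 ++ [l]))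
            (0, [])
        if ds.1 = n then min minDestroyed n
        else
          let surv := PySem.List.sorted2 ds.2 (fun x => x.1) (fun x => x.2) true
          let res := (PySem.List.pyRange 0 (surv.length : Int) 1).foldl (fireStep surv)
            (List.replicate surv.length true, ds.1)
          min minDestroyed res.2) n

-- ===== PORT B =====
-- Source B's sweep body: running minimum destruction threshold `t` (None = no laser fired yet).
def sweepStep (st : Option Int × Int) (l : Int × Int) : Option Int × Int :=
  match st.1 with
  | none => (some (l.1 - l.2), st.2 + 1)
  | some t => if l.1 < t then (some (min t (l.1 - l.2)), st.2 + 1) else st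

def solve_alt (n : Int) (lasers : List (Int × Int)) : Int :=
  let s := PySem.List.sorted2 lasers (fun x => x.1) (fun x => x.2) false
  let m : Int := s.length
  let cuts := (PySem.List.pyRange 0 m 1).foldl
    (fun acc i =>
      if i = 0 ∨ (PySem.List.pyGetD s i ((0 : Int), (0 : Int))).1 ≠
                 (PySem.List.pyGetD s (i - 1) ((0 : Int), (0 : Int))).1
      then acc ++ [i] else acc) [m]
  cuts.foldl (fun best k =>
    let st := ((PySem.List.slice s none (some k)).reverse).foldl sweepStep (none, 0)
    min best (m - st.2)) n

-- ===== PRECONDITION & SPEC =====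
-- Pre_solve excludes exactly the inputs where Python A raises (IndexError on lasers[-1]).
def Pre_solve (n : Int) (lasers : List (Int × Int)) : Prop := lasers ≠ []
instance (n : Int) (lasers : List (Int × Int)) : Decidable (Pre_solve n lasers) := by
  unfold Pre_solve; infer_instance

def pvWitness_solve : Int × (List (Int × Int)) := (3, [(0, 1), (3, 0), (5, 2)])

def Spec_solve (n : Int) (lasers : List (Int × Int)) (out : Int) : Prop := out = solve_alt n lasers
instance (n : Int) (lasers : List (Int × Int)) (out : Int) : Decidable (Spec_solve n lasers out) := by
  unfold Spec_solve; infer_instance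

-- ===== CLAIM (what is proved, stated in full; the proofs are below) =====
def Claim_equal_solve : Prop := ∀ (n : Int) (lasers : List (Int × Int)), Dom_solve n lasers →
  Pre_solve n lasers → Spec_solve n lasers (solve n lasers)

-- ===== LEMMAS AND PROOFS =====

-- Mathematical model of the chain reaction: survivors of the right-to-left cascade.
def chainSurv : List (Int × Int) → Int
  | [] => 0
  | x :: r => 1 + chainSurv (r.filter (fun y => decide (y.1 < x.1 - x.2)))
termination_by l => l.length
decreasing_by
  simp only [List.length_cons, Nat.lt_succ_iff]
  simpa using List.length_filter_le _ r.attach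

-- Model of A's masked cascade: list of (laser, still-active) pairs.
def chainB : List ((Int × Int) × Bool) → Int
  | [] => 0
  | (x, b) :: r =>
    if b then
      ((r.countP (fun p => p.2 && decide (x.1 - p.1.1 ≤ x.2))) : Int)
        + chainB (r.map (fun p => (p.1, p.2 && !decide (x.1 - p.1.1 ≤ x.2))))
    else chainB r
termination_by l => l.length
decreasing_by all_goals simp

theorem chainSurv_ind (P : List (Int × Int) → Prop) (h0 : P [])
    (h1 : ∀ x r, P (r.filter (fun y => decide (y.1 < x.1 - x.2))) → P (x :: r)) :
    ∀ l, P l := by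
  have key : ∀ N (l : List (Int × Int)), l.length ≤ N → P l := by
    intro N
    induction N with
    | zero => intro l h; rw [List.length_eq_zero_iff.mp (Nat.le_zero.mp h)]; exact h0
    | succ N ih =>
      intro l h
      cases l with
      | nil => exact h0
      | cons x r =>
        refine h1 x r (ih _ ?_)
        have := List.length_filter_le (fun y => decide (y.1 < x.1 - x.2)) r
        simp only [List.length_cons] at h
        omega
  exact fun l => key l.length l le_rfl

theorem chainB_ind (P : List ((Int × Int) × Bool) → Prop) (h0 : P [])
    (hf : ∀ x r, P r → P ((x, false) :: r))
    (ht : ∀ x r, P (r.map (fun p => (p.1, p.2 && !decide (x.1 - p.1.1 ≤ x.2)))) →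
      P ((x, true) :: r)) :
    ∀ l, P l := by
  have key : ∀ N (l : List ((Int × Int) × Bool)), l.length ≤ N → P l := by
    intro N
    induction N with
    | zero => intro l h; rw [List.length_eq_zero_iff.mp (Nat.le_zero.mp h)]; exact h0
    | succ N ih =>
      intro l h
      match l with
      | [] => exact h0
      | (x, false) :: r =>
        simp only [List.length_cons] at h
        exact hf x r (ih r (by omega))
      | (x, true) :: r =>
        simp only [List.length_cons] at h
        exact ht x r (ih _ (by simpa using by omega))
  exact fun l => key l.length l le_rfl

theorem chainSurv_le_length (l : List (Int × Int)) : chainSurv l ≤ (l.length : Int) := by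
  induction l using chainSurv_ind with
  | h0 => simp [chainSurv]
  | h1 x r ih =>
    rw [chainSurv]
    have := List.length_filter_le (fun y => decide (y.1 < x.1 - x.2)) r
    simp only [List.length_cons]
    push_cast
    omega

theorem countP_split {α : Type} (p q : α → Bool) (l : List α) :
    l.countP p = l.countP (fun a => p a && q a) + l.countP (fun a => p a && !q a) := by
  induction l with
  | nil => simp
  | cons x r ih =>
    simp only [List.countP_cons, ih]
    cases hp : p x <;> cases hq : q x <;> simp [hp, hq] <;> omega

theorem chainB_eq (L : List ((Int × Int) × Bool)) :
    chainB L = ((L.countP (fun p => p.2)) : Int)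
      - chainSurv ((L.filter (fun p => p.2)).map (fun p => p.1)) := by
  induction L using chainB_ind with
  | h0 => simp [chainB, chainSurv]
  | hf x r ih => simpa [chainB, chainSurv] using ih
  | ht x r ih =>
    rw [chainB, if_pos rfl]
    rw [ih]
    have hcnt : (r.map (fun p => (p.1, p.2 && !decide (x.1 - p.1.1 ≤ x.2)))).countP
        (fun p => p.2) = r.countP (fun p => p.2 && !decide (x.1 - p.1.1 ≤ x.2)) := by
      rw [List.countP_map]; rfl
    have hfm : ((r.map (fun p => (p.1, p.2 && !decide (x.1 - p.1.1 ≤ x.2)))).filter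
          (fun p => p.2)).map (fun p => p.1)
        = (r.filter (fun p => p.2 && !decide (x.1 - p.1.1 ≤ x.2))).map (fun p => p.1) := by
      rw [List.filter_map, List.map_map]; rfl
    have hRf : (((x, true) :: r).filter (fun p => p.2)).map (fun p => p.1)
        = x :: (r.filter (fun p => p.2)).map (fun p => p.1) := by simp
    have hRs : chainSurv (x :: (r.filter (fun p => p.2)).map (fun p => p.1))
        = 1 + chainSurv ((r.filter (fun p => p.2 && !decide (x.1 - p.1.1 ≤ x.2))).map
            (fun p => p.1)) := by
      rw [chainSurv]
      congr 1
      refine congrArg chainSurv ?_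
      rw [List.filter_map, List.filter_filter]
      refine congrArg (List.map _) (List.filter_congr ?_)
      intro p _
      cases hp : p.2 <;> simp only [Function.comp_apply, hp, Bool.and_false, Bool.false_and,
        Bool.and_true, Bool.true_and]
      rw [Bool.eq_iff_iff]
      simp only [decide_eq_true_eq, Bool.not_eq_true', decide_eq_false_iff_not]
      omega
    rw [hcnt, hfm, hRf, hRs]
    simp only [List.countP_cons, decide_true, Bool.and_true, if_pos]
    rw [countP_split (fun p => p.2) (fun p => decide (x.1 - p.1.1 ≤ x.2)) r]
    push_cast
    ring

theorem zip_map_snd {α : Type} (xs : List α) (ys : List Bool) (f : α × Bool → Bool) :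
    xs.zip ((xs.zip ys).map f) = (xs.zip ys).map (fun p => (p.1, f p)) := by
  induction xs generalizing ys with
  | nil => simp
  | cons x xs ih =>
    cases ys with
    | nil => simp
    | cons y ys => simp [ih]

theorem inner_loop (surv : List (Int × Int)) (li : Int × Int) :
    ∀ (d k : Nat) (active : List Bool) (c : Int), surv.length - k = d →
    active.length = surv.length → k ≤ surv.length →
    (PySem.List.pyRange (k : Int) (surv.length : Int) 1).foldl (killStep surv li) (active, c)
    = (active.take k ++ ((surv.drop k).zip (active.drop k)).map
          (fun p => (p.2 && !decide (li.1 - p.1.1 ≤ li.2) : Bool)),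
       c + (((surv.drop k).zip (active.drop k)).countP
          (fun p => p.2 && decide (li.1 - p.1.1 ≤ li.2)) : Int)) := by
  intro d
  induction d with
  | zero =>
    intro k active c hd hlen hk
    have hk' : k = surv.length := by omega
    subst hk'
    rw [PySem.List.pyRange_one_eq_nil (by omega)]
    have h1 : active.drop surv.length = [] := by rw [← hlen, List.drop_length]
    have h2 : active.take surv.length = active := List.take_of_length_le (le_of_eq hlen)
    simp [h1, h2, List.drop_length]
  | succ d ih =>
    intro k active c hd hlen hk
    have hklt : k < surv.length := by omega
    have hka : k < active.length := by omega
    rw [PySem.List.pyRange_one_cons (by exact_mod_cast hklt), List.foldl_cons]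
    have hg1 : PySem.List.pyGetD active (k : Int) false = active[k] := by
      rw [PySem.List.pyGetD_eq_getElem active false (by positivity) (by exact_mod_cast hka)]
      simp
    have hg2 : PySem.List.pyGetD surv (k : Int) ((0:Int),(0:Int)) = surv[k] := by
      rw [PySem.List.pyGetD_eq_getElem surv _ (by positivity) (by exact_mod_cast hklt)]
      simp
    have hsd : surv.drop k = surv[k] :: surv.drop (k + 1) := List.drop_eq_getElem_cons hklt
    have had : active.drop k = active[k] :: active.drop (k + 1) := List.drop_eq_getElem_cons hka
    have hcast : ((k : Int) + 1) = ((k + 1 : Nat) : Int) := by push_cast; ring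
    by_cases hb : active[k] = true
    · by_cases hc : li.1 - surv[k].1 ≤ li.2
      · have hstep : killStep surv li (active, c) (k : Int)
            = (active.set k false, c + 1) := by
          unfold killStep
          rw [hg1, hg2, if_pos hb, if_pos hc]
          simp
        rw [hstep, hcast, ih (k+1) (active.set k false) (c+1) (by omega)
          (by simpa using hlen) (by omega)]
        have h1 : (active.set k false).take (k+1) = active.take k ++ [false] := by
          rw [List.take_set, List.take_succ, List.getElem?_eq_getElem hka]
          rw [List.set_append]
          simp [Nat.min_eq_left hka.le]
        have h2 : (active.set k false).drop (k+1) = active.drop (k+1) := by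
          rw [List.drop_set, if_pos (by omega)]
        rw [h1, h2, hsd, had, List.zip_cons_cons, List.map_cons, List.countP_cons]
        simp only [hb, hc, decide_true, Bool.and_true, Bool.not_true, Bool.true_and, if_pos,
          Prod.mk.injEq]
        refine ⟨by simp, by push_cast; ring⟩
      · have hstep : killStep surv li (active, c) (k : Int) = (active, c) := by
          unfold killStep
          rw [hg1, hg2, if_pos hb, if_neg hc]
        rw [hstep, hcast, ih (k+1) active c (by omega) hlen (by omega),
          hsd, had, List.zip_cons_cons, List.map_cons, List.countP_cons]
        simp only [hb, hc, decide_false, Bool.and_false, Bool.not_false, Bool.true_and,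
          Bool.and_true, List.take_succ, List.getElem?_eq_getElem hka, hb, Prod.mk.injEq]
        refine ⟨by simp [hb], by simp⟩
    · have hb' : active[k] = false := by simpa using hb
      have hstep : killStep surv li (active, c) (k : Int) = (active, c) := by
        unfold killStep
        rw [hg1, hb']
        simp
      rw [hstep, hcast, ih (k+1) active c (by omega) hlen (by omega),
        hsd, had, List.zip_cons_cons, List.map_cons, List.countP_cons]
      simp only [hb', Bool.false_and, List.take_succ, List.getElem?_eq_getElem hka,
        Prod.mk.injEq]
      refine ⟨by simp [hb'], by simp⟩

theorem outer_loop (surv : List (Int × Int)) :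
    ∀ (d k : Nat) (active : List Bool) (c : Int), surv.length - k = d →
    active.length = surv.length → k ≤ surv.length →
    ((PySem.List.pyRange (k : Int) (surv.length : Int) 1).foldl (fireStep surv) (active, c)).2
    = c + chainB ((surv.drop k).zip (active.drop k)) := by
  intro d
  induction d with
  | zero =>
    intro k active c hd hlen hk
    have hk' : k = surv.length := by omega
    have ha : active.drop k = [] := by apply List.drop_eq_nil_of_le; omega
    rw [hk', PySem.List.pyRange_one_eq_nil (by omega)]
    rw [← hk', ha]
    simp [List.drop_length, chainB]
  | succ d ih =>
    intro k active c hd hlen hk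
    have hklt : k < surv.length := by omega
    have hka : k < active.length := by omega
    rw [PySem.List.pyRange_one_cons (by exact_mod_cast hklt), List.foldl_cons]
    have hg1 : PySem.List.pyGetD active (k : Int) false = active[k] := by
      rw [PySem.List.pyGetD_eq_getElem active false (by positivity) (by exact_mod_cast hka)]
      simp
    have hg2 : PySem.List.pyGetD surv (k : Int) ((0:Int),(0:Int)) = surv[k] := by
      rw [PySem.List.pyGetD_eq_getElem surv _ (by positivity) (by exact_mod_cast hklt)]
      simp
    have hsd : surv.drop k = surv[k] :: surv.drop (k + 1) := List.drop_eq_getElem_cons hklt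
    have had : active.drop k = active[k] :: active.drop (k + 1) := List.drop_eq_getElem_cons hka
    have hcast : ((k : Int) + 1) = ((k + 1 : Nat) : Int) := by push_cast; ring
    by_cases hb : active[k] = true
    · have hstep : fireStep surv (active, c) (k : Int)
          = (active.take (k+1) ++ ((surv.drop (k+1)).zip (active.drop (k+1))).map
              (fun p => (p.2 && !decide (surv[k].1 - p.1.1 ≤ surv[k].2) : Bool)),
             c + (((surv.drop (k+1)).zip (active.drop (k+1))).countP
              (fun p => p.2 && decide (surv[k].1 - p.1.1 ≤ surv[k].2)) : Int)) := by
        unfold fireStep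
        rw [hg1, if_pos hb, hg2, hcast]
        exact inner_loop surv surv[k] (surv.length - (k+1)) (k+1) active c rfl hlen (by omega)
      rw [hstep, hcast]
      have hlen2 : (active.take (k+1) ++ ((surv.drop (k+1)).zip (active.drop (k+1))).map
          (fun p => (p.2 && !decide (surv[k].1 - p.1.1 ≤ surv[k].2) : Bool))).length
          = surv.length := by
        simp [List.length_take, List.length_zip, hlen]
        omega
      rw [ih (k+1) _ _ (by omega) hlen2 (by omega)]
      have htl : (active.take (k+1)).length = k + 1 := by simp; omega
      have hdr : (active.take (k+1) ++ ((surv.drop (k+1)).zip (active.drop (k+1))).map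
            (fun p => (p.2 && !decide (surv[k].1 - p.1.1 ≤ surv[k].2) : Bool))).drop (k+1)
          = ((surv.drop (k+1)).zip (active.drop (k+1))).map
            (fun p => (p.2 && !decide (surv[k].1 - p.1.1 ≤ surv[k].2) : Bool)) := by
        have h := List.drop_left (l₁ := List.take (k+1) active)
          (l₂ := ((surv.drop (k+1)).zip (active.drop (k+1))).map
            (fun p => (p.2 && !decide (surv[k].1 - p.1.1 ≤ surv[k].2) : Bool)))
        rwa [htl] at h
      rw [hdr, zip_map_snd]
      rw [hsd, had, List.zip_cons_cons]
      rw [hb, chainB]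
      simp only [if_pos]
      ring
    · have hb' : active[k] = false := by simpa using hb
      have hstep : fireStep surv (active, c) (k : Int) = (active, c) := by
        unfold fireStep
        rw [hg1, hb']
        simp
      rw [hstep, hcast, ih (k+1) active c (by omega) hlen (by omega), hsd, had,
        List.zip_cons_cons, hb', chainB]
      simp

theorem sweep_some (l : List (Int × Int)) : ∀ (t c : Int),
    (l.foldl sweepStep (some t, c)).2 = c + chainSurv (l.filter (fun y => decide (y.1 < t))) := by
  induction l with
  | nil => intro t c; simp [chainSurv]
  | cons x r ih =>
    intro t c
    by_cases hx : x.1 < t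
    · rw [List.foldl_cons]
      have hstep : sweepStep (some t, c) x = (some (min t (x.1 - x.2)), c + 1) := by
        simp [sweepStep, hx]
      rw [hstep, List.filter_cons, if_pos (by simpa using hx)]
      rw [ih (min t (x.1 - x.2)) (c + 1), chainSurv]
      have hff : (r.filter (fun y => decide (y.1 < t))).filter
          (fun y => decide (y.1 < x.1 - x.2)) =
          r.filter (fun y => decide (y.1 < min t (x.1 - x.2))) := by
        rw [List.filter_filter]
        apply List.filter_congr
        intro y _
        rw [Bool.eq_iff_iff]
        simp only [Bool.and_eq_true, decide_eq_true_eq]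
        omega
      rw [hff]; ring
    · rw [List.foldl_cons]
      have hstep : sweepStep (some t, c) x = (some t, c) := by simp [sweepStep, hx]
      rw [hstep, List.filter_cons, if_neg (by simpa using hx)]
      exact ih t c

theorem sweep_none (l : List (Int × Int)) (c : Int) :
    (l.foldl sweepStep (none, c)).2 = c + chainSurv l := by
  cases l with
  | nil => simp [chainSurv]
  | cons x r =>
    simp only [List.foldl_cons, sweepStep]
    rw [sweep_some, chainSurv]
    ring

theorem zip_replicate_true (l : List (Int × Int)) :
    l.zip (List.replicate l.length true) = l.map (fun x => (x, true)) := by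
  induction l with
  | nil => simp
  | cons x r ih => simp [List.replicate_succ, ih]

-- A's whole double loop: destroyed-so-far + (survivors destroyed by the cascade).
theorem chain_loop (surv : List (Int × Int)) (c : Int) :
    ((PySem.List.pyRange 0 (surv.length : Int) 1).foldl (fireStep surv)
      (List.replicate surv.length true, c)).2
    = c + (surv.length : Int) - chainSurv surv := by
  have h0 : ((0 : Nat) : Int) = (0 : Int) := rfl
  have h := outer_loop surv surv.length 0 (List.replicate surv.length true) c
    (by omega) (by simp) (by omega)
  rw [h0] at h
  rw [h]
  simp only [List.drop_zero]
  rw [zip_replicate_true, chainB_eq]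
  have h1 : (surv.map (fun x => (x, true))).countP (fun p => p.2) = surv.length := by
    rw [List.countP_map]
    simp [Function.comp_def]
  have h2 : ((surv.map (fun x => (x, true))).filter (fun p => p.2)).map (fun p => p.1)
      = surv := by
    rw [List.filter_map, List.map_map]
    simp [Function.comp_def]
  rw [h1, h2]
  ring

-- lexicographic order on pairs used by Python's tuple sort
def LexLe (a b : Int × Int) : Prop := a.1 < b.1 ∨ (a.1 = b.1 ∧ a.2 ≤ b.2)

theorem insertBy_lex_le (bf : (Int × Int) → (Int × Int) → Bool)
    (hbf : ∀ a b, bf a b = (decide (a.1 < b.1) || (!decide (b.1 < a.1) && decide (a.2 < b.2))))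
    (x : Int × Int) (ys : List (Int × Int)) (h : ys.Pairwise LexLe) :
    (PySem.List.insertBy bf x ys).Pairwise LexLe := by
  induction ys with
  | nil => simp [PySem.List.insertBy, LexLe]
  | cons y t ih =>
    rw [List.pairwise_cons] at h
    obtain ⟨hy, ht⟩ := h
    rw [PySem.List.insertBy]
    by_cases hb : bf x y = true
    · rw [if_pos hb]
      rw [hbf] at hb
      simp only [Bool.or_eq_true, Bool.and_eq_true, Bool.not_eq_true', decide_eq_true_eq,
        decide_eq_false_iff_not] at hb
      refine List.pairwise_cons.mpr ⟨?_, List.pairwise_cons.mpr ⟨hy, ht⟩⟩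
      intro z hz
      rcases List.mem_cons.mp hz with rfl | hz
      · unfold LexLe; omega
      · have := hy z hz
        unfold LexLe at this ⊢
        omega
    · rw [if_neg hb]
      rw [hbf] at hb
      simp only [Bool.or_eq_true, Bool.and_eq_true, Bool.not_eq_true', decide_eq_true_eq,
        decide_eq_false_iff_not, not_or, not_and] at hb
      refine List.pairwise_cons.mpr ⟨?_, ih ht⟩
      intro z hz
      rcases (PySem.List.mem_insertBy bf x z t).mp hz with rfl | hz
      · unfold LexLe; omega
      · exact hy z hz

theorem insertBy_lex_ge (bf : (Int × Int) → (Int × Int) → Bool)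
    (hbf : ∀ a b, bf a b = (decide (b.1 < a.1) || (!decide (a.1 < b.1) && decide (b.2 < a.2))))
    (x : Int × Int) (ys : List (Int × Int)) (h : ys.Pairwise (fun a b => LexLe b a)) :
    (PySem.List.insertBy bf x ys).Pairwise (fun a b => LexLe b a) := by
  induction ys with
  | nil => simp [PySem.List.insertBy, LexLe]
  | cons y t ih =>
    rw [List.pairwise_cons] at h
    obtain ⟨hy, ht⟩ := h
    rw [PySem.List.insertBy]
    by_cases hb : bf x y = true
    · rw [if_pos hb]
      rw [hbf] at hb
      simp only [Bool.or_eq_true, Bool.and_eq_true, Bool.not_eq_true', decide_eq_true_eq,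
        decide_eq_false_iff_not] at hb
      refine List.pairwise_cons.mpr ⟨?_, List.pairwise_cons.mpr ⟨hy, ht⟩⟩
      intro z hz
      rcases List.mem_cons.mp hz with rfl | hz
      · unfold LexLe; omega
      · have := hy z hz
        unfold LexLe at this ⊢
        omega
    · rw [if_neg hb]
      rw [hbf] at hb
      simp only [Bool.or_eq_true, Bool.and_eq_true, Bool.not_eq_true', decide_eq_true_eq,
        decide_eq_false_iff_not, not_or, not_and] at hb
      refine List.pairwise_cons.mpr ⟨?_, ih ht⟩
      intro z hz
      rcases (PySem.List.mem_insertBy bf x z t).mp hz with rfl | hz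
      · unfold LexLe; omega
      · exact hy z hz

theorem sorted2_pairwise_le (xs : List (Int × Int)) :
    (PySem.List.sorted2 xs (fun x => x.1) (fun x => x.2) false).Pairwise LexLe := by
  have key : ∀ (l : List (Int × Int)) (acc : List (Int × Int)), acc.Pairwise LexLe →
      (l.foldl (fun acc x => PySem.List.insertBy
        (fun a b => decide (a.1 < b.1) || (!decide (b.1 < a.1) && decide (a.2 < b.2))) x acc)
        acc).Pairwise LexLe := by
    intro l
    induction l with
    | nil => intro acc h; exact h
    | cons x t ih =>
      intro acc h
      exact ih _ (insertBy_lex_le _ (fun a b => rfl) x acc h)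
  simpa [PySem.List.sorted2] using key xs [] (by simp)

theorem sorted2_pairwise_ge (xs : List (Int × Int)) :
    (PySem.List.sorted2 xs (fun x => x.1) (fun x => x.2) true).Pairwise (fun a b => LexLe b a) := by
  have key : ∀ (l : List (Int × Int)) (acc : List (Int × Int)), acc.Pairwise (fun a b => LexLe b a) →
      (l.foldl (fun acc x => PySem.List.insertBy
        (fun a b => decide (b.1 < a.1) || (!decide (a.1 < b.1) && decide (b.2 < a.2))) x acc)
        acc).Pairwise (fun a b => LexLe b a) := by
    intro l
    induction l with
    | nil => intro acc h; exact h
    | cons x t ih =>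
      intro acc h
      exact ih _ (insertBy_lex_ge _ (fun a b => rfl) x acc h)
  simpa [PySem.List.sorted2] using key xs [] (by simp)

-- Python's reverse tuple sort of a permutation of a LexLe-sorted list is its reverse.
theorem sorted2_rev_eq_reverse (xs ys : List (Int × Int)) (h : xs.Perm ys)
    (hys : ys.Pairwise LexLe) :
    PySem.List.sorted2 xs (fun x => x.1) (fun x => x.2) true = ys.reverse := by
  apply List.Perm.eq_of_pairwise (le := fun a b => LexLe b a)
  · intro a b _ _ hab hba
    unfold LexLe at hab hba
    have h1 : a.1 = b.1 := by omega
    have h2 : a.2 = b.2 := by omega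
    exact Prod.ext h1 h2
  · exact sorted2_pairwise_ge xs
  · rw [List.pairwise_reverse]
    exact hys
  · exact ((PySem.List.sorted2_perm xs _ _ true).trans h).trans (ys.reverse_perm).symm

theorem filter_split (q : Int) (s : List (Int × Int))
    (hs : s.Pairwise (fun a b => a.1 ≤ b.1)) :
    ∃ u v, s = u ++ v ∧ s.filter (fun y => decide (y.1 < q)) = u ∧
      (∀ y ∈ u, y.1 < q) ∧ (∀ y ∈ v, q ≤ y.1) := by
  induction s with
  | nil => exact ⟨[], [], by simp⟩
  | cons x t ih =>
    rw [List.pairwise_cons] at hs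
    obtain ⟨hx, ht⟩ := hs
    by_cases hq : x.1 < q
    · obtain ⟨u, v, he, hf, hu, hv⟩ := ih ht
      refine ⟨x :: u, v, by simp [he], ?_, ?_, hv⟩
      · rw [List.filter_cons, if_pos (by simpa using hq), hf]
      · intro y hy
        rcases List.mem_cons.mp hy with rfl | hy
        · exact hq
        · exact hu y hy
    · refine ⟨[], x :: t, by simp, ?_, by simp, ?_⟩
      · rw [List.filter_cons, if_neg (by simpa using hq)]
        rw [List.filter_eq_nil_iff]
        intro y hy
        have := hx y hy
        simp only [decide_eq_true_eq]
        omega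
      · intro y hy
        rcases List.mem_cons.mp hy with rfl | hy
        · omega
        · have := hx y hy; omega

theorem foldl_min_eq_of_dominate (a : Int) (l1 l2 : List Int)
    (h12 : ∀ y ∈ l2, a ≤ y ∨ ∃ x ∈ l1, x ≤ y)
    (h21 : ∀ x ∈ l1, a ≤ x ∨ ∃ y ∈ l2, y ≤ x) :
    l1.foldl min a = l2.foldl min a := by
  obtain ⟨q1a, q1⟩ := PySem.List.foldl_min_le l1 a
  obtain ⟨q2a, q2⟩ := PySem.List.foldl_min_le l2 a
  apply le_antisymm
  · rcases PySem.List.foldl_min_mem l2 a with h | h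
    · rw [h]; exact q1a
    · rcases h12 _ h with hy | ⟨x, hx, hxy⟩
      · exact q1a.trans hy
      · exact (q1 x hx).trans hxy
  · rcases PySem.List.foldl_min_mem l1 a with h | h
    · rw [h]; exact q2a
    · rcases h21 _ h with hy | ⟨y, hy2, hyx⟩
      · exact q2a.trans hy
      · exact (q2 y hy2).trans hyx

def powersD (newPos : Int) (ls : List (Int × Int)) : List Int :=
  PySem.List.sorted (ls.foldl (fun s l => PySem.Set.add s (newPos - l.1))
    (PySem.Set.add PySem.Set.empty 0)) (fun x => x) false

def AvalD (n newPos m : Int) (ls : List (Int × Int)) (pw : Int) : Int :=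
  if ((ls.countP (fun l => decide (newPos - l.1 ≤ pw)) : Int)) = n then n
  else m - chainSurv (PySem.List.sorted2 (ls.filter (fun l => !decide (newPos - l.1 ≤ pw)))
    (fun x => x.1) (fun x => x.2) true)

def BvalD (m : Int) (s : List (Int × Int)) (k : Int) : Int :=
  m - chainSurv ((PySem.List.slice s none (some k)).reverse)

def cutsD (s : List (Int × Int)) : List Int :=
  ((s.length : Int)) :: (PySem.List.pyRange 0 (s.length : Int) 1).filter
    (fun i => decide (i = 0 ∨ (PySem.List.pyGetD s i ((0 : Int), (0 : Int))).1 ≠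
                 (PySem.List.pyGetD s (i - 1) ((0 : Int), (0 : Int))).1))

theorem partition_foldl (newPos power : Int) : ∀ (t : List (Int × Int)) (c : Int)
    (acc : List (Int × Int)),
    t.foldl (fun acc l => if newPos - l.1 ≤ power then (acc.1 + 1, acc.2)
      else (acc.1, acc.2 ++ [l])) (c, acc)
    = (c + (t.countP (fun l => decide (newPos - l.1 ≤ power)) : Int),
       acc ++ t.filter (fun l => !decide (newPos - l.1 ≤ power))) := by
  intro t
  induction t with
  | nil => intro c acc; simp
  | cons x r ih =>
    intro c acc
    by_cases h : newPos - x.1 ≤ power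
    · rw [List.foldl_cons, if_pos h, ih, List.countP_cons, List.filter_cons]
      simp [h]
      push_cast
      ring
    · rw [List.foldl_cons, if_neg h, ih, List.countP_cons, List.filter_cons]
      simp [h]

theorem countP_not_int (p : (Int × Int) → Bool) (l : List (Int × Int)) :
    (l.countP p : Int) + ((l.filter (fun x => !p x)).length : Int) = (l.length : Int) := by
  induction l with
  | nil => simp
  | cons x r ih =>
    rw [List.countP_cons, List.filter_cons]
    cases h : p x <;> simp [h] <;> push_cast <;> omega

theorem solveA_eq (n : Int) (lasers : List (Int × Int)) (la : Int × Int)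
    (hla : (PySem.List.sorted lasers (fun x => x.1) false).getLast? = some la) :
    solve n lasers
    = (((powersD (la.1 + 1) (PySem.List.sorted lasers (fun x => x.1) false)).filter
          (fun pw => !decide (pw < 0))).map
        (AvalD n (la.1 + 1) ((lasers.length : Int))
          (PySem.List.sorted lasers (fun x => x.1) false))).foldl min n := by
  simp only [solve, PySem.List.pyGet?_neg_one, hla]
  rw [List.foldl_map]
  rw [← PySem.List.foldl_if_eq_foldl_filter (fun pw => !decide (pw < 0))
    (fun md pw => min md (AvalD n (la.1 + 1) ((lasers.length : Int))
      (PySem.List.sorted lasers (fun x => x.1) false) pw)), ← powersD]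
  apply PySem.List.foldl_congr_mem
  intro acc pw hpw
  by_cases hneg : pw < 0
  · simp [hneg]
  · rw [if_neg hneg, if_pos (show (!decide (pw < 0)) = true by simp [hneg])]
    rw [partition_foldl]
    simp only [List.nil_append, Int.zero_add]
    set ls := PySem.List.sorted lasers (fun x => x.1) false with hls
    set cnt := (ls.countP (fun l => decide ((la.1 + 1) - l.1 ≤ pw)) : Int) with hcnt
    set flt := ls.filter (fun l => !decide ((la.1 + 1) - l.1 ≤ pw)) with hflt
    by_cases hskip : cnt = n
    · rw [if_pos (show cnt = n by exact hskip), AvalD, if_pos (by exact hskip)]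
    · rw [if_neg (by exact hskip)]
      rw [chain_loop]
      have hsl : ((PySem.List.sorted2 flt (fun x => x.1) (fun x => x.2) true).length : Int)
          = (flt.length : Int) := by
        exact_mod_cast (PySem.List.sorted2_perm flt (fun x => x.1) (fun x => x.2) true).length_eq
      have hlsl : (ls.length : Int) = (lasers.length : Int) := by
        exact_mod_cast (PySem.List.sorted_perm lasers (fun x => x.1) false).length_eq
      have htot := countP_not_int (fun l => decide ((la.1 + 1) - l.1 ≤ pw)) ls
      rw [AvalD, if_neg (by exact hskip), hsl, ← hflt]
      generalize chainSurv (PySem.List.sorted2 flt (fun x => x.1) (fun x => x.2) true) = C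
      rw [← hcnt, ← hflt] at htot
      omega

theorem solveB_eq (n : Int) (lasers : List (Int × Int)) :
    solve_alt n lasers
    = ((cutsD (PySem.List.sorted2 lasers (fun x => x.1) (fun x => x.2) false)).map
        (BvalD ((lasers.length : Int)) (PySem.List.sorted2 lasers (fun x => x.1) (fun x => x.2) false))).foldl min n := by
  simp only [solve_alt]
  rw [PySem.List.foldl_append_ite_eq_filter]
  rw [List.foldl_map]
  have hlen2 := (PySem.List.sorted2_perm lasers (fun x => x.1) (fun x => x.2) false).length_eq
  have hlen : ((PySem.List.sorted2 lasers (fun x => x.1) (fun x => x.2) false).length : Int)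
      = (lasers.length : Int) := by
    exact_mod_cast hlen2
  simp only [cutsD, BvalD, hlen, List.singleton_append]
  apply PySem.List.foldl_congr_mem
  intro acc k hk
  rw [sweep_none]
  norm_num

theorem mem_fst_le_getLast (l : List (Int × Int)) (h : l.Pairwise (fun a b => a.1 ≤ b.1))
    (la : Int × Int) (hla : l.getLast? = some la) : ∀ y ∈ l, y.1 ≤ la.1 := by
  induction l with
  | nil => simp at hla
  | cons x t ih =>
    rw [List.pairwise_cons] at h
    obtain ⟨hx, ht⟩ := h
    cases t with
    | nil =>
      simp only [List.getLast?_singleton, Option.some.injEq] at hla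
      subst hla
      simp
    | cons z t2 =>
      have hla2 : (z :: t2).getLast? = some la := by
        rw [← hla, List.getLast?_cons_cons]
      intro y hy
      rcases List.mem_cons.mp hy with rfl | hy
      · have hz : la ∈ z :: t2 := List.mem_of_getLast? hla2
        exact hx la hz
      · exact ih ht hla2 y hy

-- A's reverse tuple sort of the survivors is B's reversed sorted prefix filter.
theorem bridge (ls s : List (Int × Int)) (hperm : ls.Perm s) (hsp : s.Pairwise LexLe)
    (newPos q : Int) :
    PySem.List.sorted2 (ls.filter (fun l => !decide (newPos - l.1 ≤ newPos - q)))
      (fun x => x.1) (fun x => x.2) true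
    = (s.filter (fun y => decide (y.1 < q))).reverse := by
  have h1 : ls.filter (fun l => !decide (newPos - l.1 ≤ newPos - q))
      = ls.filter (fun y => decide (y.1 < q)) := by
    apply List.filter_congr
    intro y _
    rw [Bool.eq_iff_iff]
    simp only [Bool.not_eq_true', decide_eq_false_iff_not, decide_eq_true_eq]
    omega
  rw [h1]
  exact sorted2_rev_eq_reverse _ _ (hperm.filter _) (hsp.filter _)

theorem filter_take (s : List (Int × Int)) (hf : s.Pairwise (fun a b => a.1 ≤ b.1)) (q : Int) :
    ∃ c, c ≤ s.length ∧ s.filter (fun y => decide (y.1 < q)) = s.take c ∧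
      (∀ j, j < c → ∀ (h2 : j < s.length), s[j].1 < q) ∧
      (∀ j, c ≤ j → ∀ (h2 : j < s.length), q ≤ s[j].1) := by
  obtain ⟨u, v, hsuv, hfu, hu, hv⟩ := filter_split q s hf
  have hul : u.length ≤ s.length := by rw [hsuv]; simp
  refine ⟨u.length, hul, by rw [hfu, hsuv, List.take_left], ?_, ?_⟩
  · intro j hj h2
    have he : s[j] = u[j]'(by omega) := by
      rw [List.getElem_of_eq hsuv, List.getElem_append_left hj]
    rw [he]
    exact hu _ (List.getElem_mem _)
  · intro j hjc h2
    have hjv : j - u.length < v.length := by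
      rw [hsuv] at h2; simp at h2; omega
    have he : s[j] = v[j - u.length]'hjv := by
      rw [List.getElem_of_eq hsuv, List.getElem_append_right hjc]
    rw [he]
    exact hv _ (List.getElem_mem _)

theorem val_match (n m newPos : Int) (ls s : List (Int × Int)) (hperm : ls.Perm s)
    (hsp : s.Pairwise LexLe) (q : Int) (c : Nat) (hcle : c ≤ s.length)
    (htake : s.filter (fun y => decide (y.1 < q)) = s.take c)
    (hnoskip : ((ls.countP (fun l => decide (newPos - l.1 ≤ newPos - q))) : Int) ≠ n) :
    AvalD n newPos m ls (newPos - q) = BvalD m s ((c : Int)) := by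
  rw [AvalD, if_neg hnoskip, BvalD, bridge ls s hperm hsp newPos q, htake]
  congr 3
  rw [PySem.List.slice_to _ (by positivity)]
  simp

theorem filter_flt_length (ls s : List (Int × Int)) (hperm : ls.Perm s)
    (newPos q : Int) (c : Nat) (hcle : c ≤ s.length)
    (htake : s.filter (fun y => decide (y.1 < q)) = s.take c) :
    (ls.filter (fun l => !decide (newPos - l.1 ≤ newPos - q))).length = c := by
  have h1 : ls.filter (fun l => !decide (newPos - l.1 ≤ newPos - q))
      = ls.filter (fun y => decide (y.1 < q)) := by
    apply List.filter_congr
    intro y _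
    rw [Bool.eq_iff_iff]
    simp only [Bool.not_eq_true', decide_eq_false_iff_not, decide_eq_true_eq]
    omega
  rw [h1, (hperm.filter _).length_eq, htake, List.length_take]
  omega

theorem skip_bound (n m newPos : Int) (ls s : List (Int × Int)) (hperm : ls.Perm s)
    (hm : (s.length : Int) = m) (q : Int) (c : Nat) (hcle : c ≤ s.length)
    (htake : s.filter (fun y => decide (y.1 < q)) = s.take c)
    (hskip : ((ls.countP (fun l => decide (newPos - l.1 ≤ newPos - q))) : Int) = n) :
    n ≤ BvalD m s ((c : Int)) := by
  have hfl := filter_flt_length ls s hperm newPos q c hcle htake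
  have htot := countP_not_int (fun l => decide (newPos - l.1 ≤ newPos - q)) ls
  have hlen : (ls.length : Int) = m := by rw [← hm]; exact_mod_cast hperm.length_eq
  rw [BvalD, PySem.List.slice_to _ (by positivity), Int.toNat_natCast]
  have hcs : chainSurv ((s.take c).reverse) ≤ (c : Int) := by
    have := chainSurv_le_length ((s.take c).reverse)
    simpa [List.length_take, Nat.min_eq_left hcle] using this
  rw [hfl] at htot
  omega

-- Membership of a boundary index in B's cut list.
theorem cut_mem (s : List (Int × Int)) (c : Nat) (hcle : c ≤ s.length)
    (hP : c = s.length ∨ c = 0 ∨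
      ∃ (h1 : c - 1 < s.length) (h2 : c < s.length), s[c-1].1 ≠ s[c].1) :
    ((c : Int)) ∈ cutsD s := by
  rw [cutsD]
  rcases Nat.eq_or_lt_of_le hcle with he | hlt
  · subst he; exact List.mem_cons_self
  · apply List.mem_cons_of_mem
    rw [List.mem_filter]
    refine ⟨?_, ?_⟩
    · rw [PySem.List.mem_pyRange_one]
      exact ⟨by positivity, by exact_mod_cast hlt⟩
    · rw [decide_eq_true_eq]
      rcases hP with h | h0 | ⟨h1, h2, hne⟩
      · omega
      · left; exact_mod_cast h0
      · right
        have hg1 : PySem.List.pyGetD s ((c : Int)) ((0:Int),(0:Int)) = s[c] := by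
          rw [PySem.List.pyGetD_eq_getElem s _ (by positivity) (by exact_mod_cast hlt)]
          simp
        have hcast : ((c : Int)) - 1 = (((c - 1 : Nat)) : Int) := by
          rcases Nat.eq_zero_or_pos c with hc0 | hc1
          · subst hc0; exact absurd rfl hne
          · omega
        have hg2 : PySem.List.pyGetD s ((c : Int) - 1) ((0:Int),(0:Int)) = s[c-1] := by
          rw [hcast, PySem.List.pyGetD_eq_getElem s _ (by positivity) (by exact_mod_cast h1)]
          simp
        rw [hg1, hg2]
        exact hne.symm

-- ===== VERDICT (by name: the statement is the Claim_ definition above) =====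
theorem solve_spec : Claim_equal_solve := by
  intro n lasers _ hpre
  unfold Spec_solve
  unfold Pre_solve at hpre
  have hlsne : PySem.List.sorted lasers (fun x => x.1) false ≠ [] := by
    rw [Ne, PySem.List.sorted_eq_nil_iff]; exact hpre
  cases hla : (PySem.List.sorted lasers (fun x => x.1) false).getLast? with
  | none => exact absurd (List.getLast?_eq_none_iff.mp hla) hlsne
  | some la =>
  rw [solveA_eq n lasers la hla, solveB_eq n lasers]
  set ls := PySem.List.sorted lasers (fun x => x.1) false with hls
  set s := PySem.List.sorted2 lasers (fun x => x.1) (fun x => x.2) false with hs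
  set newPos := la.1 + 1 with hnp
  set m := ((lasers.length : Nat) : Int) with hm
  have hsp : s.Pairwise LexLe := sorted2_pairwise_le lasers
  have hsfst : s.Pairwise (fun a b => a.1 ≤ b.1) := by
    apply hsp.imp
    intro a b h
    unfold LexLe at h
    omega
  have hperm : ls.Perm s :=
    (PySem.List.sorted_perm lasers _ false).trans (PySem.List.sorted2_perm lasers _ _ false).symm
  have hmlen : (s.length : Int) = m := by
    rw [hm]
    exact_mod_cast (PySem.List.sorted2_perm lasers (fun x => x.1) (fun x => x.2) false).length_eq
  have hlsp : ls.Pairwise (fun a b => a.1 ≤ b.1) :=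
    PySem.List.sorted_pairwise lasers (fun x => x.1)
  have hmax : ∀ y ∈ ls, y.1 ≤ la.1 := mem_fst_le_getLast ls hlsp la hla
  have hmaxs : ∀ y ∈ s, y.1 ≤ la.1 := fun y hy => hmax y (hperm.mem_iff.mpr hy)
  have hmono : ∀ (i j : Nat) (hij : i ≤ j) (hj : j < s.length),
      (s[i]'(Nat.lt_of_le_of_lt hij hj)).1 ≤ s[j].1 := by
    intro i j hij hj
    rcases Nat.eq_or_lt_of_le hij with rfl | hlt
    · exact le_refl _
    · exact (List.pairwise_iff_getElem.mp hsfst) i j (by omega) hj hlt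
  have hpow0 : (0:Int) ∈ powersD newPos ls := by
    rw [powersD, PySem.List.mem_sorted, PySem.Set.mem_foldl_add]
    left
    rw [PySem.Set.mem_add]
    right; rfl
  have hpowl : ∀ l ∈ ls, (newPos - l.1) ∈ powersD newPos ls := by
    intro l hl
    rw [powersD, PySem.List.mem_sorted, PySem.Set.mem_foldl_add]
    exact Or.inr ⟨l, hl, rfl⟩
  apply foldl_min_eq_of_dominate
  · -- every B cut value is matched or dominated on the A side
    intro y hy
    obtain ⟨k, hk, rfl⟩ := List.mem_map.mp hy
    rw [cutsD, List.mem_cons] at hk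
    rcases hk with hk | hk
    · subst hk
      have htake : s.filter (fun y => decide (y.1 < newPos)) = s.take s.length := by
        rw [List.take_length]
        apply List.filter_eq_self.mpr
        intro y hy2
        simp only [decide_eq_true_eq]
        have := hmaxs y hy2
        omega
      by_cases hskip : ((ls.countP (fun l => decide (newPos - l.1 ≤ newPos - newPos))) : Int) = n
      · left
        exact skip_bound n m newPos ls s hperm hmlen newPos s.length le_rfl htake hskip
      · right
        refine ⟨AvalD n newPos m ls 0, ?_, ?_⟩
        · exact List.mem_map.mpr ⟨0, List.mem_filter.mpr ⟨hpow0, by simp⟩, rfl⟩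
        · have hv := val_match n m newPos ls s hperm hsp newPos s.length le_rfl htake hskip
          rw [sub_self] at hv
          rw [hv]
    · rw [List.mem_filter] at hk
      obtain ⟨hkr, hkP⟩ := hk
      rw [PySem.List.mem_pyRange_one] at hkr
      obtain ⟨hk0, hkm⟩ := hkr
      set kk := k.toNat with hkk
      have hkcast : (kk : Int) = k := Int.toNat_of_nonneg hk0
      have hkklt : kk < s.length := by omega
      set q := s[kk].1 with hq
      rw [decide_eq_true_eq] at hkP
      have hP' : kk = 0 ∨ (1 ≤ kk ∧
          (s[kk-1]'(Nat.lt_of_le_of_lt (Nat.sub_le kk 1) hkklt)).1 ≠ s[kk].1) := by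
        rcases hkP with h0 | hne
        · left; omega
        · by_cases hkk0 : kk = 0
          · left; exact hkk0
          · right
            refine ⟨by omega, ?_⟩
            have hg1 : PySem.List.pyGetD s k ((0:Int),(0:Int)) = s[kk] := by
              rw [PySem.List.pyGetD_eq_getElem s _ hk0 hkm]
            have hcast2 : k - 1 = (((kk - 1 : Nat)) : Int) := by omega
            have hg2 : PySem.List.pyGetD s (k - 1) ((0:Int),(0:Int))
                = s[kk-1]'(Nat.lt_of_le_of_lt (Nat.sub_le kk 1) hkklt) := by
              rw [hcast2, PySem.List.pyGetD_eq_getElem s _ (by positivity)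
                (by exact_mod_cast (by omega : kk - 1 < s.length))]
              simp
            rw [hg1, hg2] at hne
            exact fun h => hne h.symm
      obtain ⟨c₀, hc₀le, htake₀, hlt₀, hge₀⟩ := filter_take s hsfst q
      have hc₀ : c₀ = kk := by
        rcases Nat.lt_trichotomy c₀ kk with h | h | h
        · exfalso
          rcases hP' with h0 | ⟨h1, hne⟩
          · omega
          · have hc₀lt : c₀ < s.length := Nat.lt_trans h hkklt
            have hk1lt : kk - 1 < s.length := Nat.lt_of_le_of_lt (Nat.sub_le kk 1) hkklt
            have hq1 : q ≤ (s[c₀]'hc₀lt).1 := hge₀ c₀ le_rfl hc₀lt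
            have hq2 : (s[c₀]'hc₀lt).1 ≤ (s[kk-1]'hk1lt).1 :=
              hmono c₀ (kk-1) (by omega) hk1lt
            have hq3 : (s[kk-1]'hk1lt).1 ≤ s[kk].1 := hmono (kk-1) kk (by omega) hkklt
            rw [← hq] at hq3
            omega
        · exact h
        · exfalso
          have := hlt₀ kk h hkklt
          rw [← hq] at this
          omega
      subst hc₀
      have hmem : s[kk] ∈ ls := hperm.mem_iff.mpr (List.getElem_mem _)
      have hpwn : ¬ (newPos - q) < 0 := by
        have := hmaxs s[kk] (List.getElem_mem _)
        rw [← hq] at this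
        omega
      by_cases hskip : ((ls.countP (fun l => decide (newPos - l.1 ≤ newPos - q))) : Int) = n
      · left
        have := skip_bound n m newPos ls s hperm hmlen q kk hc₀le htake₀ hskip
        rwa [hkcast] at this
      · right
        refine ⟨AvalD n newPos m ls (newPos - q), ?_, ?_⟩
        · refine List.mem_map.mpr ⟨newPos - q, List.mem_filter.mpr ⟨hpowl s[kk] hmem, ?_⟩, rfl⟩
          simp [hpwn]
        · have hv := val_match n m newPos ls s hperm hsp q kk hc₀le htake₀ hskip
          rw [hv, hkcast]
  · -- every admitted A power value is matched or dominated on the B side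
    intro x hx
    obtain ⟨pw, hpwf, rfl⟩ := List.mem_map.mp hx
    rw [List.mem_filter] at hpwf
    obtain ⟨hpwm, hpwn⟩ := hpwf
    by_cases hskip : ((ls.countP (fun l => decide (newPos - l.1 ≤ pw))) : Int) = n
    · left
      rw [AvalD, if_pos hskip]
    · right
      set q := newPos - pw with hqd
      have hpweq : newPos - q = pw := by omega
      obtain ⟨c₀, hc₀le, htake₀, hlt₀, hge₀⟩ := filter_take s hsfst q
      have hcut : ((c₀ : Int)) ∈ cutsD s := by
        apply cut_mem s c₀ hc₀le
        rcases Nat.eq_or_lt_of_le hc₀le with he | hlt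
        · left; exact he
        · right
          by_cases h0 : c₀ = 0
          · left; exact h0
          · right
            refine ⟨by omega, hlt, ?_⟩
            have ha := hlt₀ (c₀-1) (by omega) (by omega)
            have hb := hge₀ c₀ le_rfl hlt
            omega
      refine ⟨BvalD m s ((c₀:Int)), List.mem_map.mpr ⟨_, hcut, rfl⟩, ?_⟩
      have hv := val_match n m newPos ls s hperm hsp q c₀ hc₀le htake₀
        (by rw [hpweq]; exact hskip)
      rw [hpweq] at hv
      rw [hv]
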